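-- pv_equiv track=rewrite | github.com/kento1109/radie | src/extractor.py | _create_group_idx_list
-- ===== SOURCE A (Python) =====
-- from typing import List, Union, Tuple
--
-- def _create_group_idx_list(heads_list: List[int]) -> List[int]:
--     group_list = list()
--     idx = -1
--     for head in heads_list:
--         if head == 'not_related':
--             idx += 1
--             group_list.append(idx)
--         else:
--             group_list.append(idx)
--     return group_list
-- ===== SOURCE B (Python) =====
-- def _create_group_idx_list(heads_list):
--     # The marker comparison in A ('head == "not_related"') can never be true
--     # for int/None elements, so every position gets the initial index -1.
--     return [-1] * len(heads_list)
-- ===== Notes on version B (the rewrite author's own statement) =====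
-- stated objective: simpler
-- what changed: A's branching accumulator loop is replaced by the closed form [-1]*len(heads_list): since list elements are ints/None, the string comparison head == 'not_related' never fires and the counter stays -1 throughout.
import Mathlib
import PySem

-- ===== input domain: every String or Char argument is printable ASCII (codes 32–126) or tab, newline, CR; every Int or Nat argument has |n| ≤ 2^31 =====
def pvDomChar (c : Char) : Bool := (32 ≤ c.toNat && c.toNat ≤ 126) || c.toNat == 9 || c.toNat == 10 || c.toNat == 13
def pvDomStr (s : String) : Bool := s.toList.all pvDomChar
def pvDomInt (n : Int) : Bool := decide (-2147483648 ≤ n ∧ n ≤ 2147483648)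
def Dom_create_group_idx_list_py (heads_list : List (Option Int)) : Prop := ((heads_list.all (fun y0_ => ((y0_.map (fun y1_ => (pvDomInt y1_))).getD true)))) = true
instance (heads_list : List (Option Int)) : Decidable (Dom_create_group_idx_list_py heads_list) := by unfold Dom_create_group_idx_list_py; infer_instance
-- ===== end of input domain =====

-- B replaces A's branching accumulator loop by the closed form replicate n (-1): the
-- marker comparison against the string 'not_related' never matches an int/None element.


-- ===== PORT A =====
-- Port of A: fold over the list carrying (idx, group_list); the equality test
-- head == 'not_related' is an int/None-vs-string comparison, always False in Python.
def create_group_idx_list_py (heads_list : List (Option Int)) : List Int :=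
  let st := heads_list.foldl
    (fun (st : Int × List Int) (_head : Option Int) =>
      if False then (st.1 + 1, st.2 ++ [st.1 + 1])  -- head == 'not_related' (never true for Option Int)
      else (st.1, st.2 ++ [st.1]))
    (-1, [])
  st.2

-- ===== PORT B =====
def create_group_idx_list_py_alt (heads_list : List (Option Int)) : List Int :=
  List.replicate heads_list.length (-1)

-- ===== PRECONDITION & SPEC =====
def Spec_create_group_idx_list_py (heads_list : List (Option Int)) (out : List Int) : Prop := out = create_group_idx_list_py_alt heads_list
instance (heads_list : List (Option Int)) (out : List Int) : Decidable (Spec_create_group_idx_list_py heads_list out) := by unfold Spec_create_group_idx_list_py; infer_instance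

-- ===== CLAIM (what is proved, stated in full; the proofs are below) =====
def Claim_equal_create_group_idx_list_py : Prop := ∀ (heads_list : List (Option Int)), Dom_create_group_idx_list_py heads_list → Spec_create_group_idx_list_py heads_list (create_group_idx_list_py heads_list)

-- ===== LEMMAS AND PROOFS =====

-- ===== VERDICT (by name: the statement is the Claim_ definition above) =====
-- Loop invariant: starting from any accumulator (i, acc), the (simplified) fold
-- body appends i for every remaining element.
theorem pv_fold_inv (l : List (Option Int)) (i : Int) (acc : List Int) :
    l.foldl (fun (st : Int × List Int) (_head : Option Int) => (st.1, st.2 ++ [st.1])) (i, acc)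
    = (i, acc ++ List.replicate l.length i) := by
  induction l generalizing acc with
  | nil => simp
  | cons h t ih => simp [ih, List.replicate_succ, List.append_assoc]

theorem create_group_idx_list_py_spec : Claim_equal_create_group_idx_list_py := by
  intro heads_list _
  unfold Spec_create_group_idx_list_py create_group_idx_list_py create_group_idx_list_py_alt
  simp only [if_false]
  rw [pv_fold_inv]
  simp
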